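-- pv_equiv track=rewrite | github.com/mediwind/PS_Algorithm | 백준/Gold/30023. 전구 상태 바꾸기/전구 상태 바꾸기.py | min_ops_to_unify
-- ===== SOURCE A (Python) =====
-- def min_ops_to_unify(s):
--     # map colors to 0,1,2
--     mp = {'R':0, 'G':1, 'B':2}
--     n = len(s)
--     arr = [mp[ch] for ch in s]
--
--     INF = 10**18
--     best = INF
--
--     for target in range(3):
--         cur = arr[:]  # 복사
--         ops = 0
--         # i는 연산 시작 인덱스(0-based)
--         for i in range(n - 2):
--             # i 위치를 target으로 만들기 위해 필요한 연산 횟수 (0..2)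
--             need = (target - cur[i]) % 3
--             if need:
--                 ops += need
--                 # need번 연산을 i, i+1, i+2에 더함 (mod 3)
--                 cur[i] = (cur[i] + need) % 3
--                 cur[i+1] = (cur[i+1] + need) % 3
--                 cur[i+2] = (cur[i+2] + need) % 3
--         # 마지막 두가 target인지 확인
--         if cur[n-2] == target and cur[n-1] == target:
--             if ops < best:
--                 best = ops
--
--     return best if best != INF else -1
-- ===== SOURCE B (Python) =====
-- def min_ops_to_unify(s):
--     # Single pass over the string for all three targets at once: instead of
--     # copying and mutating the array per target, carry for each target the
--     # pending additions (p1 from the op started one step back, p2 from two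
--     # steps back) and the running op count.
--     mp = {'R': 0, 'G': 1, 'B': 2}
--     vals = [mp[ch] for ch in s]
--     n = len(vals)
--     states = [(0, 0, 0), (0, 0, 0), (0, 0, 0)]  # (p1, p2, ops) per target
--     for v in vals[:n - 2]:
--         states = [((t - (v + p1 + p2)) % 3, p1, ops + (t - (v + p1 + p2)) % 3)
--                   for t, (p1, p2, ops) in enumerate(states)]
--     INF = 10 ** 18
--     best = INF
--     for t, (p1, p2, ops) in enumerate(states):
--         if (vals[n - 2] + p1 + p2) % 3 == t and (vals[n - 1] + p1) % 3 == t and ops < best: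
--             best = ops
--     return best if best != INF else -1
-- ===== Notes on version B (the rewrite author's own statement) =====
-- stated objective: alternative
-- what changed: B replaces A's three per-target passes that each copy the array and mutate three cells per step by a single left-to-right pass over the string that carries, for all three targets simultaneously, the pending operation amounts (p1, p2) and the running op count, reconstructing the last two cells' final values from the pending amounts.
import Mathlib
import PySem

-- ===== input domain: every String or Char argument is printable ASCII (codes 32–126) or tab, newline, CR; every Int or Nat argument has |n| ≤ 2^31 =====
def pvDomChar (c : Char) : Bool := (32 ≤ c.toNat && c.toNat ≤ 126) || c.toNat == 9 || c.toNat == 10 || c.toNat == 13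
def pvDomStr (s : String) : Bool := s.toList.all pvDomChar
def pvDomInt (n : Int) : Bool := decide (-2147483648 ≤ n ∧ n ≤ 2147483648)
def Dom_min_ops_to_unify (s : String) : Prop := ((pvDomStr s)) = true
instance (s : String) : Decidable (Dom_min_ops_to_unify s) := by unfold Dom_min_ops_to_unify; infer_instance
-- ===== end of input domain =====

-- B replaces the per-target array copy + in-place mutation by a single left-to-right
-- pass carrying, for all three targets at once, the pending operation amounts
-- (p1, p2) and the running op count; same return value on Pre_ (objective: alternative).

-- ===== PORT A =====
-- the dict mp = {'R':0,'G':1,'B':2}; a lookup of any other char raises KeyError in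
-- Python — those inputs are excluded by Pre_, the default 0 here is never claimed about
def pvMp (c : Char) : Int :=
  if c = 'R' then 0 else if c = 'G' then 1 else if c = 'B' then 2 else 0

-- body of A's inner loop: one operation-start index i (always 0 ≤ i ≤ n-3 in range)
def pvAStep (target : Int) (st : List Int × Int) (i : Int) : List Int × Int :=
  let cur := st.1
  let ops := st.2
  let need := PySem.Int.mod (target - PySem.List.pyGetD cur i 0) 3
  if need ≠ 0 then
    let cur1 := PySem.List.pySetD cur i (PySem.Int.mod (PySem.List.pyGetD cur i 0 + need) 3)
    let cur2 := PySem.List.pySetD cur1 (i + 1) (PySem.Int.mod (PySem.List.pyGetD cur1 (i + 1) 0 + need) 3)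
    let cur3 := PySem.List.pySetD cur2 (i + 2) (PySem.Int.mod (PySem.List.pyGetD cur2 (i + 2) 0 + need) 3)
    (cur3, ops + need)
  else (cur, ops)

def min_ops_to_unify (s : String) : Int :=
  let arr := s.toList.map pvMp
  let n : Int := PySem.List.len arr
  let INF : Int := 10 ^ 18
  let best := [(0 : Int), 1, 2].foldl (fun best target =>
    let r := (PySem.List.pyRange 0 (n - 2) 1).foldl (pvAStep target) (arr, 0)
    if PySem.List.pyGetD r.1 (n - 2) 0 = target ∧ PySem.List.pyGetD r.1 (n - 1) 0 = target then
      if r.2 < best then r.2 else best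
    else best) INF
  if best ≠ INF then best else -1

-- ===== PORT B =====
-- body of B's single pass: advance all three per-target states (p1, p2, ops) by one value v
def pvBStep (states : List (Int × Int × Int)) (v : Int) : List (Int × Int × Int) :=
  (PySem.List.enumerate states 0).map (fun p =>
    let t := p.1
    let p1 := p.2.1
    let p2 := p.2.2.1
    let ops := p.2.2.2
    (PySem.Int.mod (t - (v + p1 + p2)) 3, p1, ops + PySem.Int.mod (t - (v + p1 + p2)) 3))

def min_ops_to_unify_alt (s : String) : Int :=
  let vals := s.toList.map pvMp
  let n : Int := PySem.List.len vals
  let states : List (Int × Int × Int) := [(0, 0, 0), (0, 0, 0), (0, 0, 0)]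
  let states := (PySem.List.slice vals none (some (n - 2))).foldl pvBStep states
  let INF : Int := 10 ^ 18
  let best := (PySem.List.enumerate states 0).foldl (fun best p =>
    let t := p.1
    let p1 := p.2.1
    let p2 := p.2.2.1
    let ops := p.2.2.2
    if PySem.Int.mod (PySem.List.pyGetD vals (n - 2) 0 + p1 + p2) 3 = t ∧
       PySem.Int.mod (PySem.List.pyGetD vals (n - 1) 0 + p1) 3 = t ∧ ops < best
    then ops else best) INF
  if best ≠ INF then best else -1

-- ===== PRECONDITION & SPEC =====
-- Pre_ excludes exactly the inputs where Python A raises: the empty string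
-- (IndexError on arr[-2]) and strings with a character other than R/G/B (KeyError on mp[ch]).
def Pre_min_ops_to_unify (s : String) : Prop :=
  s.toList ≠ [] ∧ s.toList.all (fun c => c == 'R' || c == 'G' || c == 'B') = true
instance (s : String) : Decidable (Pre_min_ops_to_unify s) := by
  unfold Pre_min_ops_to_unify; infer_instance

def pvWitness_min_ops_to_unify : String := "RGB"

def Spec_min_ops_to_unify (s : String) (out : Int) : Prop := out = min_ops_to_unify_alt s
instance (s : String) (out : Int) : Decidable (Spec_min_ops_to_unify s out) := by
  unfold Spec_min_ops_to_unify; infer_instance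

-- ===== CLAIM (what is proved, stated in full; the proofs are below) =====
def Claim_equal_min_ops_to_unify : Prop := ∀ (s : String), Dom_min_ops_to_unify s → Pre_min_ops_to_unify s → Spec_min_ops_to_unify s (min_ops_to_unify s)

-- ===== LEMMAS AND PROOFS =====

-- proof-side: B's step restricted to one target
def pvTStep (t : Int) (st : Int × Int × Int) (v : Int) : Int × Int × Int :=
  (PySem.Int.mod (t - (v + st.1 + st.2.1)) 3, st.1, st.2.2 + PySem.Int.mod (t - (v + st.1 + st.2.1)) 3)

-- B's fold over the 3-state list splits into three independent per-target folds
lemma bfold_split (xs : List Int) (a b c : Int × Int × Int) :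
    xs.foldl pvBStep [a, b, c] =
      [xs.foldl (pvTStep 0) a, xs.foldl (pvTStep 1) b, xs.foldl (pvTStep 2) c] := by
  induction xs generalizing a b c with
  | nil => rfl
  | cons v xs ih =>
      simp only [List.foldl_cons, pvBStep, PySem.List.enumerate_cons, PySem.List.enumerate_nil,
        List.map_cons, List.map_nil]
      rw [ih]
      rfl

lemma modsub (a b : Int) :
    PySem.Int.mod (a - PySem.Int.mod b 3) 3 = PySem.Int.mod (a - b) 3 := by
  simp only [PySem.Int.mod_eq_emod_of_pos (b := 3) (by norm_num)]
  omega

lemma modadd (a b : Int) :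
    PySem.Int.mod (PySem.Int.mod b 3 + a) 3 = PySem.Int.mod (b + a) 3 := by
  simp only [PySem.Int.mod_eq_emod_of_pos (b := 3) (by norm_num)]
  omega

lemma pvmod_id (v : Int) (h1 : 0 ≤ v) (h2 : v < 3) : PySem.Int.mod v 3 = v := by
  rw [PySem.Int.mod_eq_emod_of_pos (by norm_num)]
  omega

lemma pvmod_bounds (a : Int) : 0 ≤ PySem.Int.mod a 3 ∧ PySem.Int.mod a 3 < 3 :=
  ⟨PySem.Int.mod_nonneg a (by norm_num), PySem.Int.mod_lt a (by norm_num)⟩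

lemma pvGetD_set_self (l : List Int) (i : Nat) (a d : Int) (h : i < l.length) :
    (l.set i a).getD i d = a := by
  simp [List.getD_eq_getElem?_getD, h]

lemma pvGetD_set_ne (l : List Int) (i j : Nat) (a d : Int) (h : i ≠ j) :
    (l.set i a).getD j d = l.getD j d := by
  simp [List.getD_eq_getElem?_getD, h]

-- one step of A's inner loop, summarised by what it does to the three touched cells
lemma stepA (t : Int) (cur : List Int) (ops : Int) (k : Nat) (h2 : k + 2 < cur.length)
    (hb1 : 0 ≤ cur.getD (k + 1) 0 ∧ cur.getD (k + 1) 0 < 3)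
    (hb2 : 0 ≤ cur.getD (k + 2) 0 ∧ cur.getD (k + 2) 0 < 3) :
    ∃ cur',
      pvAStep t (cur, ops) (k : Int) = (cur', ops + PySem.Int.mod (t - cur.getD k 0) 3) ∧
      cur'.length = cur.length ∧
      (∀ j : Nat, j ≠ k → j ≠ k + 1 → j ≠ k + 2 → cur'.getD j 0 = cur.getD j 0) ∧
      cur'.getD (k + 1) 0 =
        PySem.Int.mod (cur.getD (k + 1) 0 + PySem.Int.mod (t - cur.getD k 0) 3) 3 ∧
      cur'.getD (k + 2) 0 =
        PySem.Int.mod (cur.getD (k + 2) 0 + PySem.Int.mod (t - cur.getD k 0) 3) 3 := by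
  have e1 : ((k : Int)) + 1 = (((k + 1 : Nat)) : Int) := by push_cast; ring
  have e2 : ((k : Int)) + 2 = (((k + 2 : Nat)) : Int) := by push_cast; ring
  by_cases hz : PySem.Int.mod (t - cur.getD k 0) 3 = 0
  · refine ⟨cur, ?_, rfl, fun j _ _ _ => rfl, ?_, ?_⟩
    · simp only [pvAStep, PySem.List.pyGetD_natCast, hz]
      simp
    · rw [hz, add_zero]
      exact (pvmod_id _ hb1.1 hb1.2).symm
    · rw [hz, add_zero]
      exact (pvmod_id _ hb2.1 hb2.2).symm
  · refine ⟨((cur.set k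
        (PySem.Int.mod (cur.getD k 0 + PySem.Int.mod (t - cur.getD k 0) 3) 3)).set (k + 1)
        (PySem.Int.mod ((cur.set k
          (PySem.Int.mod (cur.getD k 0 + PySem.Int.mod (t - cur.getD k 0) 3) 3)).getD (k + 1) 0 +
          PySem.Int.mod (t - cur.getD k 0) 3) 3)).set (k + 2)
        (PySem.Int.mod (((cur.set k
          (PySem.Int.mod (cur.getD k 0 + PySem.Int.mod (t - cur.getD k 0) 3) 3)).set (k + 1)
          (PySem.Int.mod ((cur.set k
            (PySem.Int.mod (cur.getD k 0 + PySem.Int.mod (t - cur.getD k 0) 3) 3)).getD (k + 1) 0 +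
            PySem.Int.mod (t - cur.getD k 0) 3) 3)).getD (k + 2) 0 +
          PySem.Int.mod (t - cur.getD k 0) 3) 3), ?_, ?_, ?_, ?_, ?_⟩
    · simp only [pvAStep, e1, e2, PySem.List.pySetD_natCast, PySem.List.pyGetD_natCast]
      rw [if_pos hz]
    · simp [List.length_set]
    · intro j hj0 hj1 hj2
      rw [pvGetD_set_ne _ _ _ _ _ (Ne.symm hj2), pvGetD_set_ne _ _ _ _ _ (Ne.symm hj1),
        pvGetD_set_ne _ _ _ _ _ (Ne.symm hj0)]
    · rw [pvGetD_set_ne _ _ _ _ _ (by omega), pvGetD_set_self _ _ _ _ (by simp [List.length_set]; omega),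
        pvGetD_set_ne _ _ _ _ _ (by omega)]
    · rw [pvGetD_set_self _ _ _ _ (by simp [List.length_set]; omega),
        pvGetD_set_ne _ _ _ _ _ (by omega), pvGetD_set_ne _ _ _ _ _ (by omega)]

-- the main loop invariant, by induction on the number of remaining operation indices
lemma pvInv (t : Int) (vals : List Int) (hv : ∀ v ∈ vals, 0 ≤ v ∧ v < 3) :
    ∀ (m k : Nat) (cur : List Int) (p1 p2 ops : Int),
      cur.length = vals.length →
      k + m + 2 = vals.length →
      (∀ j : Nat, k + 2 ≤ j → j < vals.length → cur.getD j 0 = vals.getD j 0) →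
      cur.getD k 0 = PySem.Int.mod (vals.getD k 0 + p1 + p2) 3 →
      cur.getD (k + 1) 0 = PySem.Int.mod (vals.getD (k + 1) 0 + p1) 3 →
      ((PySem.List.pyRange (k : Int) ((vals.length : Int) - 2) 1).foldl (pvAStep t) (cur, ops)).2 =
          (((vals.drop k).take m).foldl (pvTStep t) (p1, p2, ops)).2.2 ∧
      ((PySem.List.pyRange (k : Int) ((vals.length : Int) - 2) 1).foldl (pvAStep t) (cur, ops)).1.getD
            (vals.length - 2) 0 =
          PySem.Int.mod (vals.getD (vals.length - 2) 0 +
            (((vals.drop k).take m).foldl (pvTStep t) (p1, p2, ops)).1 +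
            (((vals.drop k).take m).foldl (pvTStep t) (p1, p2, ops)).2.1) 3 ∧
      ((PySem.List.pyRange (k : Int) ((vals.length : Int) - 2) 1).foldl (pvAStep t) (cur, ops)).1.getD
            (vals.length - 1) 0 =
          PySem.Int.mod (vals.getD (vals.length - 1) 0 +
            (((vals.drop k).take m).foldl (pvTStep t) (p1, p2, ops)).1) 3 := by
  intro m
  induction m with
  | zero =>
      intro k cur p1 p2 ops hlen hk hun h0 h1
      have hb : ((vals.length : Int) - 2) = (k : Int) := by omega
      rw [hb, PySem.List.pyRange_one_eq_nil (le_refl _)]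
      have e2 : vals.length - 2 = k := by omega
      have e1 : vals.length - 1 = k + 1 := by omega
      simp only [List.take_zero, List.foldl_nil, e1, e2]
      exact ⟨by trivial, h0, h1⟩
  | succ m ih =>
      intro k cur p1 p2 ops hlen hk hun h0 h1
      have hkl : k < vals.length := by omega
      have hk1l : k + 1 < vals.length := by omega
      have hk2l : k + 2 < vals.length := by omega
      have hveq : vals.getD k 0 = vals[k] := List.getD_eq_getElem vals 0 hkl
      obtain ⟨hv0, hv3⟩ := hv vals[k] (List.getElem_mem _)
      have ecast : ((k : Int)) + 1 = (((k + 1 : Nat)) : Int) := by push_cast; ring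
      have hr : PySem.List.pyRange (k : Int) ((vals.length : Int) - 2) 1 =
          (k : Int) :: PySem.List.pyRange (((k + 1 : Nat)) : Int) ((vals.length : Int) - 2) 1 := by
        rw [PySem.List.pyRange_one_cons (by omega : (k : Int) < (vals.length : Int) - 2), ecast]
      have hd : (vals.drop k).take (m + 1) = vals[k] :: (vals.drop (k + 1)).take m := by
        rw [List.drop_eq_getElem_cons hkl, List.take_succ_cons]
      -- boundedness of the two cells the step reads
      have hb1 : 0 ≤ cur.getD (k + 1) 0 ∧ cur.getD (k + 1) 0 < 3 := by
        rw [h1]; exact pvmod_bounds _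
      have hb2 : 0 ≤ cur.getD (k + 2) 0 ∧ cur.getD (k + 2) 0 < 3 := by
        rw [hun (k + 2) (by omega) hk2l, List.getD_eq_getElem vals 0 hk2l]
        exact hv _ (List.getElem_mem _)
      obtain ⟨cur', hAeq, hlen', hunt', hc1, hc2⟩ :=
        stepA t cur ops k (by omega) hb1 hb2
      -- the per-step need computed by A equals the one computed by B
      have hneed : PySem.Int.mod (t - cur.getD k 0) 3 =
          PySem.Int.mod (t - (vals[k] + p1 + p2)) 3 := by
        rw [h0, hveq, modsub]
      rw [hneed] at hAeq hc1 hc2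
      have hB : pvTStep t (p1, p2, ops) vals[k] =
          (PySem.Int.mod (t - (vals[k] + p1 + p2)) 3, p1,
            ops + PySem.Int.mod (t - (vals[k] + p1 + p2)) 3) := rfl
      rw [hr, hd]
      simp only [List.foldl_cons]
      rw [hAeq, hB]
      refine ih (k + 1) cur' (PySem.Int.mod (t - (vals[k] + p1 + p2)) 3) p1
        (ops + PySem.Int.mod (t - (vals[k] + p1 + p2)) 3)
        (hlen'.trans hlen) (by omega) ?_ ?_ ?_
      · intro j hj hjl
        rw [hunt' j (by omega) (by omega) (by omega)]
        exact hun j (by omega) hjl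
      · rw [hc1, h1, modadd]
        have : vals.getD (k + 1) 0 + p1 + PySem.Int.mod (t - (vals[k] + p1 + p2)) 3 =
            vals.getD (k + 1) 0 + PySem.Int.mod (t - (vals[k] + p1 + p2)) 3 + p1 := by ring
        rw [this]
      · rw [hc2, hun (k + 2) (by omega) hk2l]

-- per-target summary used three times at the top level (n ≥ 2 via pvInv, n = 1 directly)
lemma per_target (vals : List Int) (hv : ∀ v ∈ vals, 0 ≤ v ∧ v < 3) (hne : vals ≠ []) (t : Int) :
    ((PySem.List.pyRange 0 ((vals.length : Int) - 2) 1).foldl (pvAStep t) (vals, 0)).2 =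
        ((PySem.List.slice vals none (some ((vals.length : Int) - 2))).foldl (pvTStep t)
          (0, 0, 0)).2.2 ∧
    PySem.List.pyGetD
        ((PySem.List.pyRange 0 ((vals.length : Int) - 2) 1).foldl (pvAStep t) (vals, 0)).1
        ((vals.length : Int) - 2) 0 =
      PySem.Int.mod (PySem.List.pyGetD vals ((vals.length : Int) - 2) 0 +
        ((PySem.List.slice vals none (some ((vals.length : Int) - 2))).foldl (pvTStep t)
          (0, 0, 0)).1 +
        ((PySem.List.slice vals none (some ((vals.length : Int) - 2))).foldl (pvTStep t)
          (0, 0, 0)).2.1) 3 ∧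
    PySem.List.pyGetD
        ((PySem.List.pyRange 0 ((vals.length : Int) - 2) 1).foldl (pvAStep t) (vals, 0)).1
        ((vals.length : Int) - 1) 0 =
      PySem.Int.mod (PySem.List.pyGetD vals ((vals.length : Int) - 1) 0 +
        ((PySem.List.slice vals none (some ((vals.length : Int) - 2))).foldl (pvTStep t)
          (0, 0, 0)).1) 3 := by
  by_cases h2 : 2 ≤ vals.length
  · -- n ≥ 2: instance of the loop invariant at k = 0
    have h0l : 0 < vals.length := by omega
    have h1l : 1 < vals.length := by omega
    have c2 : ((vals.length : Int) - 2) = (((vals.length - 2 : Nat)) : Int) := by omega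
    have c1 : ((vals.length : Int) - 1) = (((vals.length - 1 : Nat)) : Int) := by omega
    have hinst := pvInv t vals hv (vals.length - 2) 0 vals 0 0 0 rfl (by omega)
      (fun j _ _ => rfl)
      (by simp only [add_zero]
          rw [List.getD_eq_getElem vals 0 h0l]
          exact (pvmod_id _ (hv _ (List.getElem_mem _)).1 (hv _ (List.getElem_mem _)).2).symm)
      (by simp only [zero_add, add_zero]
          rw [List.getD_eq_getElem vals 0 h1l]
          exact (pvmod_id _ (hv _ (List.getElem_mem _)).1 (hv _ (List.getElem_mem _)).2).symm)
    simp only [Nat.cast_zero, List.drop_zero] at hinst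
    rw [c2] at hinst
    rw [c2, c1]
    rw [PySem.List.slice_to_natCast]
    simp only [PySem.List.pyGetD_natCast, List.getD_eq_getElem?_getD] at hinst ⊢
    exact hinst
  · -- n = 1 (vals ≠ []): both loops are empty and both check the single cell
    have hl0 : vals.length ≠ 0 := by
      intro h; exact hne (List.length_eq_zero_iff.mp h)
    have hl1 : vals.length = 1 := by omega
    obtain ⟨v, rfl⟩ := List.length_eq_one_iff.mp hl1
    obtain ⟨hvb1, hvb2⟩ := hv v (by simp)
    have e2 : ((([v] : List Int).length : Int) - 2) = -1 := by simp
    have e1 : ((([v] : List Int).length : Int) - 1) = 0 := by simp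
    rw [e1, e2, PySem.List.pyRange_one_eq_nil (by norm_num : (-1 : Int) ≤ 0),
      PySem.List.slice_to_neg_one]
    simp only [List.dropLast_singleton, List.foldl_nil]
    have hg : PySem.List.pyGetD [v] (-1) 0 = v := by
      simp [pysem]
    refine ⟨by trivial, ?_, ?_⟩
    · rw [hg]
      simp only [add_zero]
      exact (pvmod_id v hvb1 hvb2).symm
    · rw [PySem.List.pyGetD_zero_cons]
      simp only [add_zero]
      exact (pvmod_id v hvb1 hvb2).symm

lemma if_merge (c1 c2 : Prop) [Decidable c1] [Decidable c2] (x best : Int) :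
    (if c1 ∧ c2 then (if x < best then x else best) else best) =
      if c1 ∧ c2 ∧ x < best then x else best := by
  split_ifs <;> tauto

-- ===== VERDICT (by name: the statement is the Claim_ definition above) =====
theorem min_ops_to_unify_spec : Claim_equal_min_ops_to_unify := by
  intro s _ hpre
  obtain ⟨hne, _⟩ := hpre
  unfold Spec_min_ops_to_unify
  have hv : ∀ v ∈ s.toList.map pvMp, 0 ≤ v ∧ v < 3 := by
    intro v hvm
    simp only [List.mem_map] at hvm
    obtain ⟨c, _, rfl⟩ := hvm
    unfold pvMp
    split_ifs <;> exact ⟨by norm_num, by norm_num⟩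
  have hneL : s.toList.map pvMp ≠ [] := by
    intro h; exact hne (List.map_eq_nil_iff.mp h)
  obtain ⟨ha0, hb0, hc0⟩ := per_target (s.toList.map pvMp) hv hneL 0
  obtain ⟨ha1, hb1, hc1⟩ := per_target (s.toList.map pvMp) hv hneL 1
  obtain ⟨ha2, hb2, hc2⟩ := per_target (s.toList.map pvMp) hv hneL 2
  simp only [min_ops_to_unify, min_ops_to_unify_alt, PySem.List.len_eq]
  rw [bfold_split]
  simp only [PySem.List.enumerate_cons, PySem.List.enumerate_nil, List.foldl_cons,
    List.foldl_nil, zero_add, Int.reduceAdd]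
  rw [hb0, hc0, ha0, hb1, hc1, ha1, hb2, hc2, ha2]
  simp only [if_merge]
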